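-- pv_equiv track=rewrite | github.com/KhizarA77/Competitive-Programming | wk6/bank.py | maxAmount
-- ===== SOURCE A (Python) =====
-- def maxAmount(people, T):
--     maxCash = 0
--     possible_money = []
--
--     for time in range(T-1, -1, -1):
--         if time in people:
--             for money in people[time]:
--                 possible_money.append(money)
--
--         if possible_money:
--             maxCash += max(possible_money)
--             possible_money.remove(max(possible_money))
--
--     return maxCash
-- ===== SOURCE B (Python) =====
-- def maxAmount(people, T):
--     # Descending sorted pending pool: arriving moneys are inserted in order,
--     # each step takes the front element (the maximum) instead of scanning
--     # with max() and remove() like A does.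
--     total = 0
--     pool = []  # descending
--     time = T - 1
--     while time >= 0:
--         if time in people:
--             for m in people[time]:
--                 i = 0
--                 while i < len(pool) and pool[i] > m:
--                     i += 1
--                 pool[i:i] = [m]
--         if pool:
--             total += pool[0]
--             pool = pool[1:]
--         time -= 1
--     return total
-- ===== Notes on version B (the rewrite author's own statement) =====
-- stated objective: alternative
-- what changed: B replaces A's per-step max()+remove() scans over an unordered pool by a descending sorted pool (sorted insertion on arrival, take the front each step), written as a countdown loop over the time variable instead of a fold over range().
import Mathlib
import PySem

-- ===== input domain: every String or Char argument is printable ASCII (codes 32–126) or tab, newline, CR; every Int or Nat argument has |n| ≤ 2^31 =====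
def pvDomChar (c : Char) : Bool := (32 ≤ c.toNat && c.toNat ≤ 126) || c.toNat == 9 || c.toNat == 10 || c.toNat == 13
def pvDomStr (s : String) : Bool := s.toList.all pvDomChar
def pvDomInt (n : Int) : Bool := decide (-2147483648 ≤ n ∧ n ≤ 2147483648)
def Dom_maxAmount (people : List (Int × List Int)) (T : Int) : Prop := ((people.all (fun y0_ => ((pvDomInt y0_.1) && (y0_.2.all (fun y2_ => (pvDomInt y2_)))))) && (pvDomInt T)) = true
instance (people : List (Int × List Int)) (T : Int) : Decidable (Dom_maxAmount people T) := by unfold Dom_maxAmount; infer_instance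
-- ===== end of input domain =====

-- Alternative algorithm: B replaces A's per-step max()+remove() scans over an unordered
-- pool by a descending sorted pool popped at the front, as a countdown recursion over time;
-- equivalence proved via a permutation invariant between the two pools.


-- ===== PORT A =====
-- one loop iteration of A: append the moneys arriving at `time`, then
-- (if the pool is nonempty) add its max and remove that max's first occurrence.
-- `time in people` / `people[time]` = first-match association-list lookup;
-- `possible_money.remove(max(...))` never raises since the max is a member,
-- so `(remove? …).getD pm` is exact.
def stepA (people : List (Int × List Int)) (st : Int × List Int) (time : Int) : Int × List Int :=
  let pm := match people.lookup time with
    | some moneys => moneys.foldl (fun acc money => acc ++ [money]) st.2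
    | none => st.2
  match PySem.List.max? pm (fun y => y) with
  | some m => (st.1 + m, (PySem.List.remove? pm m).getD pm)
  | none => (st.1, pm)

def maxAmount (people : List (Int × List Int)) (T : Int) : Int :=
  ((PySem.List.pyRange (T - 1) (-1) (-1)).foldl (stepA people) (0, [])).1

-- ===== PORT B =====
-- insert `m` into a DESCENDING sorted pool (the front-scan insertion of Source B)
def insDesc (pool : List Int) (m : Int) : List Int :=
  match pool with
  | [] => [m]
  | x :: rest => if x > m then x :: insDesc rest m else m :: x :: rest

-- Source B's countdown while-loop: fuel = number of remaining time steps, current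
-- time is fuel - 1; take the front of the descending pool each step.
def goAlt (people : List (Int × List Int)) : Nat → List Int → Int
  | 0, _ => 0
  | n+1, pool =>
    let pool' := match people.lookup (n : Int) with
      | some moneys => moneys.foldl insDesc pool
      | none => pool
    match pool' with
    | [] => goAlt people n []
    | m :: rest => m + goAlt people n rest

def maxAmount_alt (people : List (Int × List Int)) (T : Int) : Int :=
  goAlt people T.toNat []

-- ===== PRECONDITION & SPEC =====
def Spec_maxAmount (people : List (Int × List Int)) (T : Int) (out : Int) : Prop := out = maxAmount_alt people T
instance (people : List (Int × List Int)) (T : Int) (out : Int) : Decidable (Spec_maxAmount people T out) := by unfold Spec_maxAmount; infer_instance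

-- ===== CLAIM (what is proved, stated in full; the proofs are below) =====
def Claim_equal_maxAmount : Prop := ∀ (people : List (Int × List Int)) (T : Int), Dom_maxAmount people T → Spec_maxAmount people T (maxAmount people T)

-- ===== LEMMAS AND PROOFS =====

theorem insDesc_perm (xs : List Int) (m : Int) : (insDesc xs m).Perm (m :: xs) := by
  induction xs with
  | nil => simp [insDesc]
  | cons x rest ih =>
    simp only [insDesc]
    split
    · exact ((ih.cons x).trans (List.Perm.swap m x rest))
    · exact List.Perm.refl _

theorem insDesc_sorted (xs : List Int) (m : Int) (h : xs.Pairwise (· ≥ ·)) :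
    (insDesc xs m).Pairwise (· ≥ ·) := by
  induction xs with
  | nil => simp [insDesc]
  | cons x rest ih =>
    rcases List.pairwise_cons.mp h with ⟨hx, hrest⟩
    simp only [insDesc]
    split
    · rename_i hxm
      refine List.pairwise_cons.mpr ⟨?_, ih hrest⟩
      intro y hy
      rcases List.mem_cons.mp ((insDesc_perm rest m).mem_iff.mp hy) with rfl | hy
      · omega
      · exact hx y hy
    · rename_i hxm
      refine List.pairwise_cons.mpr ⟨?_, h⟩
      intro y hy
      rcases List.mem_cons.mp hy with rfl | hy
      · omega
      · exact le_trans (hx y hy) (by omega)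

theorem foldl_insDesc_perm (moneys pm : List Int) :
    (moneys.foldl insDesc pm).Perm (pm ++ moneys) := by
  induction moneys generalizing pm with
  | nil => simp
  | cons m rest ih =>
    simp only [List.foldl_cons]
    refine (ih (insDesc pm m)).trans ?_
    have h1 : (insDesc pm m ++ rest).Perm ((m :: pm) ++ rest) :=
      (insDesc_perm pm m).append_right rest
    refine h1.trans ?_
    simpa using (List.perm_middle (a := m) (l₁ := pm) (l₂ := rest)).symm

theorem foldl_insDesc_sorted (moneys pm : List Int) (h : pm.Pairwise (· ≥ ·)) :
    (moneys.foldl insDesc pm).Pairwise (· ≥ ·) := by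
  induction moneys generalizing pm with
  | nil => simpa
  | cons m rest ih => exact ih _ (insDesc_sorted pm m h)

theorem foldl_append_eq (moneys pm : List Int) :
    moneys.foldl (fun acc money => acc ++ [money]) pm = pm ++ moneys := by
  induction moneys generalizing pm with
  | nil => simp
  | cons m rest ih => simp [ih]

-- main induction: A's fold over the countdown range, started with cash c and a pool
-- pm that is a permutation of B's descending-sorted pool, yields c + B's recursion.
theorem pv_main (people : List (Int × List Int)) :
    ∀ (n : Nat) (c : Int) (pm avail : List Int), pm.Perm avail →
      avail.Pairwise (· ≥ ·) →
      ((PySem.List.pyRange ((n : Int) - 1) (-1) (-1)).foldl (stepA people) (c, pm)).1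
        = c + goAlt people n avail := by
  intro n
  induction n with
  | zero =>
    intro c pm avail _ _
    rw [PySem.List.pyRange_neg_one_eq_nil (by omega)]
    simp [goAlt]
  | succ n ih =>
    intro c pm avail hperm hsort
    rw [show (((n + 1 : Nat) : Int) - 1) = (n : Int) by push_cast; omega]
    rw [PySem.List.pyRange_neg_one_cons (by omega)]
    rw [List.foldl_cons]
    show ((PySem.List.pyRange ((n : Int) - 1) (-1) (-1)).foldl (stepA people)
      (stepA people (c, pm) (n : Int))).1 = c + goAlt people (n + 1) avail
    unfold stepA goAlt
    -- both sides do the same association-list lookup at time n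
    have key : ∀ pm' pool' : List Int, pm'.Perm pool' → pool'.Pairwise (· ≥ ·) →
        ((PySem.List.pyRange ((n : Int) - 1) (-1) (-1)).foldl (stepA people)
          (match PySem.List.max? pm' (fun y => y) with
           | some m => (c + m, (PySem.List.remove? pm' m).getD pm')
           | none => (c, pm'))).1
          = c + (match pool' with
                 | [] => goAlt people n []
                 | m :: rest => m + goAlt people n rest) := by
      intro pm' pool' hp hs
      cases hpool : pool' with
      | nil =>
        have hpm : pm' = [] := (hpool ▸ hp).eq_nil
        subst hpm
        simp only [PySem.List.max?]
        exact ih c [] [] (List.Perm.refl _) (by simp)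
      | cons m rest =>
        subst hpool
        have hpmne : pm' ≠ [] := by
          intro hnil
          rw [hnil] at hp
          exact List.cons_ne_nil m rest hp.symm.eq_nil
        obtain ⟨v, hv⟩ : ∃ v, PySem.List.max? pm' (fun y => y) = some v := by
          cases pm' with
          | nil => exact absurd rfl hpmne
          | cons p ps => exact ⟨_, PySem.List.max?_id_cons p ps⟩
        have hvmem : v ∈ pm' := PySem.List.max?_mem hv
        have hvmax : ∀ y ∈ pm', y ≤ v := PySem.List.max?_isMax hv
        -- v equals the front of the descending-sorted pool
        have hveq : v = m := by
          rcases List.pairwise_cons.mp hs with ⟨hm, _⟩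
          have h1 : v ≤ m := by
            rcases List.mem_cons.mp (hp.mem_iff.mp hvmem) with rfl | hy
            · omega
            · exact hm v hy
          have h2 : m ≤ v := hvmax m (hp.mem_iff.mpr (by simp))
          omega
        rw [hv]
        have hrm : PySem.List.remove? pm' v = some (pm'.erase v) :=
          PySem.List.remove?_eq_some_erase pm' v hvmem
        simp only [hrm, Option.getD_some]
        have herase : (pm'.erase v).Perm rest := by
          have := hp.erase v
          rw [hveq] at this ⊢
          simpa [List.erase_cons_head] using this
        have hrs : rest.Pairwise (· ≥ ·) := (List.pairwise_cons.mp hs).2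
        rw [ih (c + v) (pm'.erase v) rest herase hrs, hveq]
        ring
    cases people.lookup (n : Int) with
    | none => exact key pm avail hperm hsort
    | some moneys =>
      have hp' : (moneys.foldl (fun acc money => acc ++ [money]) pm).Perm
          (moneys.foldl insDesc avail) := by
        rw [foldl_append_eq]
        exact ((hperm.append_right moneys).trans (foldl_insDesc_perm moneys avail).symm)
      exact key _ _ hp' (foldl_insDesc_sorted moneys avail hsort)

-- the countdown range A folds over equals the one driven by T.toNat time steps
theorem pyRange_toNat (T : Int) :
    PySem.List.pyRange (T - 1) (-1) (-1)
      = PySem.List.pyRange ((T.toNat : Int) - 1) (-1) (-1) := by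
  by_cases h : 0 < T
  · rw [Int.toNat_of_nonneg (by omega)]
  · rw [PySem.List.pyRange_neg_one_eq_nil (by omega),
        PySem.List.pyRange_neg_one_eq_nil (by omega)]

-- ===== VERDICT (by name: the statement is the Claim_ definition above) =====
theorem maxAmount_spec : Claim_equal_maxAmount := by
  intro people T _
  unfold Spec_maxAmount maxAmount maxAmount_alt
  rw [pyRange_toNat]
  simpa using pv_main people T.toNat 0 [] [] (List.Perm.refl _) (by simp)
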